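-- pv_equiv track=rewrite | github.com/ngocanh-ph/TDTU-Coursework | Artificial-Intelligence/midterm_06_5240002/task2_sokoban/compare_algorithms.py | load_map
-- ===== SOURCE A (Python) =====
-- def load_map(level):
--     grid=[]
--     player=None
--     boxes=[]
--     goals=[]
--     for y,row in enumerate(level):
--         grid_row=[]
--         for x,c in enumerate(row):
--             if c=='%':
--                 grid_row.append('%')
--             else:
--                 grid_row.append(' ')
--             if c=='A':
--                 player=(x,y)
--             if c=='B':
--                 boxes.append((x,y))
--             if c=='D':
--                 goals.append((x,y))
--             if c=='C':
--                 boxes.append((x,y))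
--                 goals.append((x,y))
--         grid.append(grid_row)
--     return grid,player,boxes,goals
-- ===== SOURCE B (Python) =====
-- def load_map(level):
--     grid = [['%' if c == '%' else ' ' for c in row] for row in level]
--     boxes = [(x, y) for y, row in enumerate(level)
--              for x, c in enumerate(row) if c in ('B', 'C')]
--     goals = [(x, y) for y, row in enumerate(level)
--              for x, c in enumerate(row) if c in ('D', 'C')]
--     player = None
--     for y, row in enumerate(level):
--         for x, c in enumerate(row):
--             if c == 'A':
--                 player = (x, y)
--     return grid, player, boxes, goals
-- ===== Notes on version B (the rewrite author's own statement) =====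
-- stated objective: simpler
-- what changed: Replaces the single fused per-cell loop maintaining four accumulators with independent passes: a nested comprehension for the grid, two filtering comprehensions for boxes and goals, and a dedicated simple scan for the player.
import Mathlib
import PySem

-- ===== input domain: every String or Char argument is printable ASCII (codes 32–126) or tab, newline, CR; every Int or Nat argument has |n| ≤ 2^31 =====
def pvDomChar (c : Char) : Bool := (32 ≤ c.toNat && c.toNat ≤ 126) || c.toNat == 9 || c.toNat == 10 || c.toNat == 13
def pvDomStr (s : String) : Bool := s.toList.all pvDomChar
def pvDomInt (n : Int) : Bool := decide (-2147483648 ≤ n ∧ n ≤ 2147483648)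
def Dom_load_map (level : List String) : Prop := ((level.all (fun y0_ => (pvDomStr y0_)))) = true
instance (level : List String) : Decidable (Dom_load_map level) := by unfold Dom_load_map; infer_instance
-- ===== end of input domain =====

-- B replaces A's single fused per-cell loop by independent passes (grid map, two filters, a plain player scan); objective: simpler.


-- ===== PORT A =====
-- state = (grid, player, boxes, goals), exactly A's four variables
def load_map (level : List String) : List (List String) × (Option (Int × Int)) × (List (Int × Int)) × (List (Int × Int)) :=
  (PySem.List.enumerate level).foldl
    (fun s yr =>
      let y := yr.1
      let inner :=
        (PySem.List.enumerate yr.2.toList).foldl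
          (fun (t : List String × (Option (Int × Int)) × (List (Int × Int)) × (List (Int × Int))) xc =>
            let x := xc.1
            let c := xc.2
            let gr := t.1 ++ [if c = '%' then "%" else " "]
            let p := if c = 'A' then some (x, y) else t.2.1
            let bs := if c = 'B' then t.2.2.1 ++ [(x, y)] else t.2.2.1
            let gs := if c = 'D' then t.2.2.2 ++ [(x, y)] else t.2.2.2
            let bs := if c = 'C' then bs ++ [(x, y)] else bs
            let gs := if c = 'C' then gs ++ [(x, y)] else gs
            (gr, p, bs, gs))
          ([], s.2.1, s.2.2.1, s.2.2.2)
      (s.1 ++ [inner.1], inner.2))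
    ([], none, [], [])

-- ===== PORT B =====
def load_map_alt (level : List String) : List (List String) × (Option (Int × Int)) × (List (Int × Int)) × (List (Int × Int)) :=
  let grid := level.map (fun row => row.toList.map (fun c => if c = '%' then "%" else " "))
  let boxes := (PySem.List.enumerate level).flatMap (fun yr =>
    ((PySem.List.enumerate yr.2.toList).filter (fun xc => xc.2 == 'B' || xc.2 == 'C')).map
      (fun xc => (xc.1, yr.1)))
  let goals := (PySem.List.enumerate level).flatMap (fun yr =>
    ((PySem.List.enumerate yr.2.toList).filter (fun xc => xc.2 == 'D' || xc.2 == 'C')).map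
      (fun xc => (xc.1, yr.1)))
  let player := (PySem.List.enumerate level).foldl
    (fun p yr =>
      (PySem.List.enumerate yr.2.toList).foldl
        (fun p xc => if xc.2 = 'A' then some (xc.1, yr.1) else p) p)
    none
  (grid, player, boxes, goals)

-- ===== PRECONDITION & SPEC =====
def Spec_load_map (level : List String) (out : List (List String) × (Option (Int × Int)) × (List (Int × Int)) × (List (Int × Int))) : Prop := out = load_map_alt level
instance (level : List String) (out : List (List String) × (Option (Int × Int)) × (List (Int × Int)) × (List (Int × Int))) : Decidable (Spec_load_map level out) := by unfold Spec_load_map; infer_instance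

-- ===== CLAIM (what is proved, stated in full; the proofs are below) =====
def Claim_equal_load_map : Prop := ∀ (level : List String), Dom_load_map level → Spec_load_map level (load_map level)

-- ===== LEMMAS AND PROOFS =====

-- closed forms of A's per-row contributions
def pvCell (c : Char) : String := if c = '%' then "%" else " "
def pvRowBoxes (y : Int) (l : List (Int × Char)) : List (Int × Int) :=
  (l.filter (fun xc => xc.2 == 'B' || xc.2 == 'C')).map (fun xc => (xc.1, y))
def pvRowGoals (y : Int) (l : List (Int × Char)) : List (Int × Int) :=
  (l.filter (fun xc => xc.2 == 'D' || xc.2 == 'C')).map (fun xc => (xc.1, y))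
def pvRowP (y : Int) (l : List (Int × Char)) : Option (Int × Int) :=
  (l.reverse.find? (fun xc => xc.2 == 'A')).map (fun xc => (xc.1, y))
-- A's forward player override: last 'A' wins, falling back to p0
def pvPlayerAux (L : List (Int × String)) (p0 : Option (Int × Int)) : Option (Int × Int) :=
  L.foldl (fun p yr => (pvRowP yr.1 (PySem.List.enumerate yr.2.toList)).or p) p0

lemma pv_inner (y : Int) (l : List (Int × Char))
    (g0 : List String) (p0 : Option (Int × Int)) (b0 go0 : List (Int × Int)) :
    l.foldl
      (fun (t : List String × (Option (Int × Int)) × (List (Int × Int)) × (List (Int × Int))) xc =>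
        let x := xc.1
        let c := xc.2
        let gr := t.1 ++ [if c = '%' then "%" else " "]
        let p := if c = 'A' then some (x, y) else t.2.1
        let bs := if c = 'B' then t.2.2.1 ++ [(x, y)] else t.2.2.1
        let gs := if c = 'D' then t.2.2.2 ++ [(x, y)] else t.2.2.2
        let bs := if c = 'C' then bs ++ [(x, y)] else bs
        let gs := if c = 'C' then gs ++ [(x, y)] else gs
        (gr, p, bs, gs))
      (g0, p0, b0, go0)
    = (g0 ++ l.map (fun xc => pvCell xc.2), (pvRowP y l).or p0,
       b0 ++ pvRowBoxes y l, go0 ++ pvRowGoals y l) := by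
  induction l generalizing g0 p0 b0 go0 with
  | nil => simp [pvRowP, pvRowBoxes, pvRowGoals]
  | cons xc l ih =>
    simp only [List.foldl_cons, ih]
    clear ih
    obtain ⟨x, c⟩ := xc
    have hP : pvRowP y ((x, c) :: l)
        = (pvRowP y l).or (if c = 'A' then some (x, y) else none) := by
      by_cases h : c = 'A'
      · subst h
        simp only [pvRowP, List.reverse_cons, List.find?_append, List.find?]
        cases List.find? (fun xc => xc.2 == 'A') l.reverse <;> simp [Option.or]
      · simp [pvRowP, List.reverse_cons, List.find?_append, List.find?,
          beq_eq_false_iff_ne.mpr h, h]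
    by_cases hA : c = 'A' <;> by_cases hB : c = 'B' <;> by_cases hC : c = 'C' <;>
      by_cases hD : c = 'D' <;>
      simp_all [pvCell, pvRowBoxes, pvRowGoals, List.map_cons, List.append_assoc]

lemma pv_outer (L : List (Int × String))
    (s : List (List String) × (Option (Int × Int)) × (List (Int × Int)) × (List (Int × Int))) :
    L.foldl
      (fun s yr =>
        let y := yr.1
        let inner :=
          (PySem.List.enumerate yr.2.toList).foldl
            (fun (t : List String × (Option (Int × Int)) × (List (Int × Int)) × (List (Int × Int))) xc =>
              let x := xc.1
              let c := xc.2
              let gr := t.1 ++ [if c = '%' then "%" else " "]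
              let p := if c = 'A' then some (x, y) else t.2.1
              let bs := if c = 'B' then t.2.2.1 ++ [(x, y)] else t.2.2.1
              let gs := if c = 'D' then t.2.2.2 ++ [(x, y)] else t.2.2.2
              let bs := if c = 'C' then bs ++ [(x, y)] else bs
              let gs := if c = 'C' then gs ++ [(x, y)] else gs
              (gr, p, bs, gs))
            ([], s.2.1, s.2.2.1, s.2.2.2)
        (s.1 ++ [inner.1], inner.2))
      s
    = (s.1 ++ L.map (fun yr => (PySem.List.enumerate yr.2.toList).map (fun xc => pvCell xc.2)),
       pvPlayerAux L s.2.1,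
       s.2.2.1 ++ L.flatMap (fun yr => pvRowBoxes yr.1 (PySem.List.enumerate yr.2.toList)),
       s.2.2.2 ++ L.flatMap (fun yr => pvRowGoals yr.1 (PySem.List.enumerate yr.2.toList))) := by
  induction L generalizing s with
  | nil => simp [pvPlayerAux]
  | cons yr L ih =>
    simp only [List.foldl_cons]
    rw [pv_inner, ih]
    simp [pvPlayerAux, List.append_assoc]

-- B's per-row player scan equals A's per-row override closed form
lemma pv_rowp_fold (y : Int) (l : List (Int × Char)) (p0 : Option (Int × Int)) :
    l.foldl (fun p xc => if xc.2 = 'A' then some (xc.1, y) else p) p0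
      = (pvRowP y l).or p0 := by
  induction l generalizing p0 with
  | nil => simp [pvRowP]
  | cons xc l ih =>
    obtain ⟨x, c⟩ := xc
    rw [List.foldl_cons, ih]
    by_cases h : c = 'A'
    · subst h
      simp only [pvRowP, List.reverse_cons, List.find?_append, List.find?]
      cases List.find? (fun xc => xc.2 == 'A') l.reverse <;> simp [Option.or]
    · simp [pvRowP, List.reverse_cons, List.find?_append, List.find?,
        beq_eq_false_iff_ne.mpr h, h]

-- B's whole player scan equals A's fold of per-row overrides
lemma pv_player_fold (M : List (Int × String)) (p0 : Option (Int × Int)) :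
    M.foldl
      (fun p yr =>
        (PySem.List.enumerate yr.2.toList).foldl
          (fun p xc => if xc.2 = 'A' then some (xc.1, yr.1) else p) p)
      p0
    = pvPlayerAux M p0 := by
  induction M generalizing p0 with
  | nil => rfl
  | cons yr M ih =>
    rw [List.foldl_cons, pv_rowp_fold, ih]
    rfl

-- B's grid cell map equals A's (over enumerate, any start index)
lemma pv_grid_row (row : List Char) (s : Int) :
    (PySem.List.enumerate row s).map (fun xc => pvCell xc.2)
      = row.map (fun c => if c = '%' then "%" else " ") := by
  induction row generalizing s with
  | nil => rfl
  | cons c row ih =>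
    rw [PySem.List.enumerate_cons, List.map_cons, List.map_cons, ih]
    rfl

-- ===== VERDICT (by name: the statement is the Claim_ definition above) =====
theorem load_map_spec : Claim_equal_load_map := by
  intro level _
  show load_map level = load_map_alt level
  unfold load_map load_map_alt
  rw [pv_outer]
  refine Prod.ext ?_ (Prod.ext ?_ ?_)
  · -- grid
    have h2 := PySem.List.map_snd_enumerate (xs := level) (s := 0)
    conv_rhs => rw [← h2, List.map_map]
    simp [pv_grid_row]
  · -- player
    rw [pv_player_fold]
  · -- boxes and goals
    simp [pvRowBoxes, pvRowGoals]
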